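-- pv_equiv track=rewrite | github.com/likai945/termux-prc | leazygroups_ultimate.py | init_list
-- ===== SOURCE A (Python) =====
-- def init_list(hList,pI,sI,m):
--     dct={}
--     for host in hList:
--         mI=host.index('-',30,31) if m==1 else 0
--         prefix=host[:mI+pI]
--         root=host[mI+pI:mI+sI]
--         suffix=host[sI+mI:]
--         key=(prefix,suffix)
--         dct.setdefault(key,[])
--         dct[key].append(root)
--
--     return dct
-- ===== SOURCE B (Python) =====
-- def init_list(hList, pI, sI, m):
--     def keyroot(host):
--         mI = host.index('-', 30, 31) if m == 1 else 0
--         return ((host[:mI + pI], host[sI + mI:]), host[mI + pI:mI + sI])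
--     pairs = [keyroot(h) for h in hList]
--     keys = dict.fromkeys(k for k, _ in pairs)
--     return {k: [r for k2, r in pairs if k2 == k] for k in keys}
-- ===== Notes on version B (the rewrite author's own statement) =====
-- stated objective: alternative
-- what changed: A builds the dict incrementally with setdefault/append inside one loop; B computes the (key, root) pairs once by a key function, dedups the keys in first-occurrence order via dict.fromkeys, and builds each group by filtering the pair list per key.
import Mathlib
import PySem

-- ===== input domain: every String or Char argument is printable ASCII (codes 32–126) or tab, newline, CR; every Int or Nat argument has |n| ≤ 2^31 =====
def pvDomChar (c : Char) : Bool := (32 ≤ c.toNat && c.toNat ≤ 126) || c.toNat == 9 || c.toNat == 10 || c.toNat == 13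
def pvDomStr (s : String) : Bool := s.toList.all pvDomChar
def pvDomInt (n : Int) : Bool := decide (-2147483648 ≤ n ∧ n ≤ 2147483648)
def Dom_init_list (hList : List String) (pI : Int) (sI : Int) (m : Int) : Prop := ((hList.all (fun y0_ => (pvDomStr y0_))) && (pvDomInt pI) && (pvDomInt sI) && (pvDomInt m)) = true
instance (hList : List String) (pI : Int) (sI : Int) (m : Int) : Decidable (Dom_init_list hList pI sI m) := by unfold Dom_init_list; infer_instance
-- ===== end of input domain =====

-- B replaces A's incremental setdefault/append dict-building pass by a pipeline:
-- compute the (key, root) pairs once, dedup the keys in first-occurrence order,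
-- then build each group by filtering the pair list per key (alternative decomposition, not faster).

-- ===== PORT A =====
-- A's loop carries an Option Dict: `none` marks the ValueError of host.index('-',30,31)
-- (Pre_ excludes exactly those inputs); otherwise each branch is A's code step for step.
def init_list (hList : List String) (pI : Int) (sI : Int) (m : Int) :
    List (String × String × List String) :=
  let st : Option (PySem.Dict (String × String) (List String)) :=
    hList.foldl (fun acc host =>
      acc.bind (fun d =>
        (if m == 1 then
          (let f := PySem.Str.findFrom host "-" 30 (some 31)
           if f == -1 then none else some f)
         else some 0).map (fun mI =>
          let pre := PySem.Str.slice host none (some (mI + pI))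
          let root := PySem.Str.slice host (some (mI + pI)) (some (mI + sI))
          let suffix := PySem.Str.slice host (some (sI + mI)) none
          let key := (pre, suffix)
          (d.setdefault key []).modify key [] (fun l => l ++ [root]))))
      (some PySem.Dict.empty)
  match st with
  | some d => d.items.map (fun p => (p.1.1, p.1.2, p.2))
  | none => []

-- ===== PORT B =====
-- Source B's keyroot helper: none exactly where host.index('-',30,31) raises.
def pvKeyRoot (pI : Int) (sI : Int) (m : Int) (host : String) :
    Option ((String × String) × String) :=
  (if m == 1 then
    (let f := PySem.Str.findFrom host "-" 30 (some 31)
     if f == -1 then none else some f)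
   else some 0).map (fun mI =>
    ((PySem.Str.slice host none (some (mI + pI)),
      PySem.Str.slice host (some (sI + mI)) none),
     PySem.Str.slice host (some (mI + pI)) (some (mI + sI))))

def init_list_alt (hList : List String) (pI : Int) (sI : Int) (m : Int) :
    List (String × String × List String) :=
  match hList.mapM (pvKeyRoot pI sI m) with
  | none => []
  | some pairs =>
    let keys := PySem.List.dedup (pairs.map (fun p => p.1))
    keys.map (fun k => (k.1, k.2, (pairs.filter (fun p => p.1 == k)).map (fun x => x.2)))

-- ===== PRECONDITION & SPEC =====
-- Pre_ excludes exactly the inputs on which A raises ValueError: m == 1 while some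
-- host has no '-' in positions [30,31).
def Pre_init_list (hList : List String) (pI : Int) (sI : Int) (m : Int) : Prop :=
  m = 1 → ∀ host ∈ hList, PySem.Str.findFrom host "-" 30 (some 31) ≠ -1
instance (hList : List String) (pI : Int) (sI : Int) (m : Int) : Decidable (Pre_init_list hList pI sI m) := by unfold Pre_init_list; infer_instance

def pvWitness_init_list : List String × Int × Int × Int := (["alpha-box", "alpha-cab"], 2, 5, 0)

def Spec_init_list (hList : List String) (pI : Int) (sI : Int) (m : Int) (out : List (String × String × List String)) : Prop := out = init_list_alt hList pI sI m
instance (hList : List String) (pI : Int) (sI : Int) (m : Int) (out : List (String × String × List String)) : Decidable (Spec_init_list hList pI sI m out) := by unfold Spec_init_list; infer_instance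

-- ===== CLAIM (what is proved, stated in full; the proofs are below) =====
def Claim_equal_init_list : Prop := ∀ (hList : List String) (pI : Int) (sI : Int) (m : Int), Dom_init_list hList pI sI m → Pre_init_list hList pI sI m → Spec_init_list hList pI sI m (init_list hList pI sI m)

-- ===== LEMMAS AND PROOFS =====

-- the total pair function both ports compute under Pre_
def pvG (pI sI m : Int) (host : String) : (String × String) × String :=
  let mI := if m == 1 then PySem.Str.findFrom host "-" 30 (some 31) else 0
  ((PySem.Str.slice host none (some (mI + pI)),
    PySem.Str.slice host (some (sI + mI)) none),
   PySem.Str.slice host (some (mI + pI)) (some (mI + sI)))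

theorem pvKeyRoot_eq_some (pI sI m : Int) (host : String)
    (h : m = 1 → PySem.Str.findFrom host "-" 30 (some 31) ≠ -1) :
    pvKeyRoot pI sI m host = some (pvG pI sI m host) := by
  unfold pvKeyRoot pvG
  by_cases hm : m = 1
  · have hf : ¬ PySem.Chars.findFrom host.toList ['-'] 30 (some 31) = -1 := by
      simpa using h hm
    simp [hm, hf]
  · simp [hm]

theorem pvMapM_eq_some {α β : Type} (f : α → Option β) (g : α → β) :
    ∀ (l : List α), (∀ x ∈ l, f x = some (g x)) → l.mapM f = some (l.map g) := by
  intro l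
  induction l with
  | nil => intro _; rfl
  | cons a t ih =>
    intro h
    have ha := h a (by simp)
    have ht := ih (fun x hx => h x (by simp [hx]))
    simp [List.mapM_cons, ha, ht]

-- setdefault(key, []) followed by in-place append is exactly modify with default []
theorem pv_setdefault_modify {κ ν : Type} [BEq κ] [LawfulBEq κ]
    (d : PySem.Dict κ ν) (k : κ) (v : ν) (f : ν → ν) :
    (d.setdefault k v).modify k v f = d.modify k v f := by
  by_cases h : d.contains k = true
  · rw [PySem.Dict.setdefault_of_contains d v h]
  · have h' : d.contains k = false := by simpa using h
    rw [PySem.Dict.setdefault_of_not_contains d v h']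
    have hg : d.get? k = none := by
      simp only [PySem.Dict.contains, List.any_eq_false] at h'
      simp only [PySem.Dict.get?, Option.map_eq_none_iff, List.find?_eq_none]
      exact h'
    simp only [PySem.Dict.modify, PySem.Dict.getD, PySem.Dict.get?_insert_self, hg,
      Option.getD_some, Option.getD_none, PySem.Dict.insert_insert_self]

-- A's Option-carrying fold succeeds under Pre_ and is the plain fold over the pair list
theorem pvAfold (pI sI m : Int) :
    ∀ (l : List String) (d : PySem.Dict (String × String) (List String)),
    (∀ host ∈ l, m = 1 → PySem.Str.findFrom host "-" 30 (some 31) ≠ -1) →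
    l.foldl (fun acc host =>
      acc.bind (fun d =>
        (if m == 1 then
          (let f := PySem.Str.findFrom host "-" 30 (some 31)
           if f == -1 then none else some f)
         else some 0).map (fun mI =>
          let pre := PySem.Str.slice host none (some (mI + pI))
          let root := PySem.Str.slice host (some (mI + pI)) (some (mI + sI))
          let suffix := PySem.Str.slice host (some (sI + mI)) none
          let key := (pre, suffix)
          (d.setdefault key []).modify key [] (fun l => l ++ [root]))))
      (some d)
    = some ((l.map (pvG pI sI m)).foldl
        (fun d p => d.modify p.1 [] (fun l => l ++ [p.2])) d) := by
  intro l
  induction l with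
  | nil => intro d _; rfl
  | cons a t ih =>
    intro d h
    have hstep :
        ((if m == 1 then
            (let f := PySem.Str.findFrom a "-" 30 (some 31)
             if f == -1 then none else some f)
          else some 0).map (fun mI =>
            let pre := PySem.Str.slice a none (some (mI + pI))
            let root := PySem.Str.slice a (some (mI + pI)) (some (mI + sI))
            let suffix := PySem.Str.slice a (some (sI + mI)) none
            let key := (pre, suffix)
            (d.setdefault key []).modify key [] (fun l => l ++ [root])))
        = some (d.modify (pvG pI sI m a).1 [] (fun l => l ++ [(pvG pI sI m a).2])) := by
      by_cases hm : m = 1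
      · have hf : ¬ PySem.Chars.findFrom a.toList ['-'] 30 (some 31) = -1 := by
          simpa using h a (by simp) hm
        simp [hm, hf, pvG, pv_setdefault_modify]
      · simp [hm, pvG, pv_setdefault_modify]
    simp only [List.foldl_cons, List.map_cons, Option.bind_some, hstep]
    exact ih _ (fun x hx => h x (by simp [hx]))

-- ===== VERDICT (by name: the statement is the Claim_ definition above) =====
theorem init_list_spec : Claim_equal_init_list := by
  intro hList pI sI m _hdom hpre
  unfold Spec_init_list init_list init_list_alt
  have hpairs : hList.mapM (pvKeyRoot pI sI m) = some (hList.map (pvG pI sI m)) :=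
    pvMapM_eq_some _ _ _ (fun x hx => pvKeyRoot_eq_some pI sI m x (fun hm => hpre hm x hx))
  rw [hpairs, pvAfold pI sI m hList PySem.Dict.empty (fun x hx hm => hpre hm x hx)]
  set pairs := hList.map (pvG pI sI m) with hp
  set F := pairs.foldl (fun d p => d.modify p.1 [] (fun l => l ++ [p.2])) PySem.Dict.empty with hF
  have hnodup : F.keys.Nodup := by
    rw [hF]
    exact PySem.Dict.nodup_keys_foldl_modify_key pairs (fun p => p.1) []
      (fun _ p => fun l => l ++ [p.2]) PySem.Dict.empty (by simp [PySem.Dict.empty, PySem.Dict.keys])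
  have hkeys : F.keys = PySem.List.dedup (pairs.map (fun p => p.1)) := by
    rw [hF]
    rw [PySem.Dict.keys_foldl_modify_key pairs (fun p => p.1) []
      (fun _ p => fun l => l ++ [p.2]) PySem.Dict.empty]
    simp [PySem.List.dedup, PySem.Set.update, PySem.Set.ofList, PySem.Dict.empty,
      PySem.Dict.keys, PySem.Set.empty]
  change List.map (fun p => (p.1.1, p.1.2, p.2)) F.items =
    (PySem.List.dedup (pairs.map (fun p => p.1))).map
      (fun k => (k.1, k.2, (pairs.filter (fun p => p.1 == k)).map (fun x => x.2)))
  rw [PySem.Dict.items_eq_map_keys F hnodup []]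
  rw [hkeys, List.map_map]
  apply List.map_congr_left
  intro k _
  have hget : F.getD k [] = (pairs.filter (fun p => p.1 == k)).map (fun x => x.2) := by
    rw [hF, PySem.Dict.getD_foldl_modify_append pairs PySem.Dict.empty k]
    simp [PySem.Dict.getD, PySem.Dict.get?, PySem.Dict.empty]
  simp [Function.comp, hget]
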